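-- pv_equiv track=rewrite | github.com/herougo/Pseudocode2Code | main.py | multi_find
-- ===== SOURCE A (Python) =====
-- def multi_find(l, match_values): # not pythonic or efficient
--     # assumption: any element of values is not contained in another element
--     # in values
--     result = []
--     for i in range(len(l)):
--         for val in match_values:
--             if l[i:i+len(val)] == val:
--                 result.append(i)
--                 break
--     return result
-- ===== SOURCE B (Python) =====
-- def multi_find(l, match_values):
--     # Pattern-major traversal: collect all match start positions per pattern
--     # into a set, then emit them sorted (A is position-major with an inner break).
--     hits = set()
--     n = len(l)
--     for val in match_values:
--         for i in range(n):
--             if l.startswith(val, i):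
--                 hits.add(i)
--     return sorted(hits)
-- ===== Notes on version B (the rewrite author's own statement) =====
-- stated objective: alternative
-- what changed: Swapped the loop nesting: instead of testing every pattern at every position with slicing and an inner break, B scans per pattern with str.startswith (no substring copies), accumulates the matching start positions in a set, and returns them sorted.
import Mathlib
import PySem

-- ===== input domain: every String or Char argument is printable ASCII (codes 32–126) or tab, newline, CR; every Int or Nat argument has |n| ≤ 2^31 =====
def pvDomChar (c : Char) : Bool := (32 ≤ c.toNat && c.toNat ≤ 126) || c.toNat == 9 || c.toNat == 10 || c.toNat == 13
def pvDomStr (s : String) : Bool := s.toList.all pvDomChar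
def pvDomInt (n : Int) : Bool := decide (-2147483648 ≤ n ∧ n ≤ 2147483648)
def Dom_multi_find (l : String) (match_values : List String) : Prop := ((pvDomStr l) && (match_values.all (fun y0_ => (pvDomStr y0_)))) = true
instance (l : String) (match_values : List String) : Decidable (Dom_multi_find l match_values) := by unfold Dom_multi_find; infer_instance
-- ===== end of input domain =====

-- B swaps the loop nesting: pattern-major scan with startswith into a set, emitted sorted (alternative decomposition, same cost; return value proved equal to A's).
-- ===== PORT A =====
-- inner 'for val in match_values: if l[i:i+len(val)] == val: result.append(i); break'
def multiFindInner (cs : List Char) (i : Int) (vals : List String) (result : List Int) : List Int :=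
  match vals with
  | [] => result
  | val :: rest =>
    if PySem.List.slice cs (some i) (some (i + (val.toList.length : Int))) = val.toList
    then result ++ [i]
    else multiFindInner cs i rest result

def multi_find (l : String) (match_values : List String) : List Int :=
  let cs := l.toList
  (PySem.List.pyRange 0 (cs.length : Int) 1).foldl
    (fun result i => multiFindInner cs i match_values result) []

-- ===== PORT B =====
-- l.startswith(val, i) with 0 ≤ i ≤ len(l) is exactly startswith on the i-suffix
def multi_find_alt (l : String) (match_values : List String) : List Int :=
  let cs := l.toList
  let n : Int := cs.length
  let hits : PySem.Set Int :=
    match_values.foldl (fun h val =>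
      (PySem.List.pyRange 0 n 1).foldl (fun h i =>
        if PySem.Chars.startswith (cs.drop i.toNat) val.toList then PySem.Set.add h i else h) h)
      PySem.Set.empty
  PySem.List.sorted hits (fun x => x) false

-- ===== PRECONDITION & SPEC =====
def Spec_multi_find (l : String) (match_values : List String) (out : List Int) : Prop := out = multi_find_alt l match_values
instance (l : String) (match_values : List String) (out : List Int) : Decidable (Spec_multi_find l match_values out) := by unfold Spec_multi_find; infer_instance

-- ===== CLAIM (what is proved, stated in full; the proofs are below) =====
def Claim_equal_multi_find : Prop := ∀ (l : String) (match_values : List String), Dom_multi_find l match_values → Spec_multi_find l match_values (multi_find l match_values)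

-- ===== LEMMAS AND PROOFS =====

-- the common match test on a position, as a Bool
def matchAtB (cs : List Char) (mv : List String) (i : Int) : Bool :=
  mv.any (fun val => val.toList.isPrefixOf (cs.drop i.toNat))

lemma slice_eq_iff_prefix (cs : List Char) (i : Int) (hi : 0 ≤ i) (val : List Char) :
    (PySem.List.slice cs (some i) (some (i + (val.length : Int))) = val) ↔
      val <+: cs.drop i.toNat := by
  rw [PySem.List.slice_toNat cs hi (by omega)]
  have h : (i + (val.length : Int)).toNat - i.toNat = val.length := by omega
  rw [h]
  constructor
  · intro h'
    rw [List.prefix_iff_eq_take]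
    exact h'.symm
  · intro h'
    rw [List.prefix_iff_eq_take] at h'
    exact h'.symm

lemma multiFindInner_eq (cs : List Char) (i : Int) (hi : 0 ≤ i) (vals : List String)
    (result : List Int) :
    multiFindInner cs i vals result =
      if matchAtB cs vals i then result ++ [i] else result := by
  induction vals with
  | nil => simp [multiFindInner, matchAtB]
  | cons val rest ih =>
    by_cases hp : val.toList <+: cs.drop i.toNat
    · have h1 : PySem.List.slice cs (some i) (some (i + (val.toList.length : Int))) = val.toList :=
        (slice_eq_iff_prefix cs i hi val.toList).mpr hp
      have h2 : matchAtB cs (val :: rest) i = true := by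
        simp only [matchAtB, List.any_cons, Bool.or_eq_true, List.isPrefixOf_iff_prefix]
        exact Or.inl hp
      unfold multiFindInner
      rw [if_pos h1, h2]
      simp
    · have h1 : ¬ (PySem.List.slice cs (some i) (some (i + (val.toList.length : Int))) = val.toList) :=
        fun hc => hp ((slice_eq_iff_prefix cs i hi val.toList).mp hc)
      have h2 : matchAtB cs (val :: rest) i = matchAtB cs rest i := by
        simp [matchAtB, List.isPrefixOf_iff_prefix, hp]
      unfold multiFindInner
      rw [if_neg h1, ih]
      simp only [h2]

lemma mem_foldl_add_if (q : Int → Bool) (xs : List Int) :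
    ∀ (h : PySem.Set Int) (y : Int),
      y ∈ xs.foldl (fun h i => if q i then PySem.Set.add h i else h) h ↔
        y ∈ h ∨ (y ∈ xs ∧ q y = true) := by
  induction xs with
  | nil => simp
  | cons x xs ih =>
    intro h y
    simp only [List.foldl_cons, ih]
    by_cases hq : q x
    · simp only [hq, if_pos, PySem.Set.mem_add, List.mem_cons]
      constructor
      · rintro ((hy | rfl) | hy)
        · exact Or.inl hy
        · exact Or.inr ⟨Or.inl rfl, hq⟩
        · exact Or.inr ⟨Or.inr hy.1, hy.2⟩
      · rintro (hy | ⟨(rfl | hy), hqy⟩)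
        · exact Or.inl (Or.inl hy)
        · exact Or.inl (Or.inr rfl)
        · exact Or.inr ⟨hy, hqy⟩
    · simp only [hq, List.mem_cons]
      constructor
      · rintro (hy | hy)
        · exact Or.inl hy
        · exact Or.inr ⟨Or.inr hy.1, hy.2⟩
      · rintro (hy | ⟨(rfl | hy), hqy⟩)
        · exact Or.inl hy
        · exact absurd hqy (by simpa using hq)
        · exact Or.inr ⟨hy, hqy⟩

lemma nodup_foldl_add_if (q : Int → Bool) (xs : List Int) :
    ∀ (h : PySem.Set Int), h.Nodup →
      (xs.foldl (fun h i => if q i then PySem.Set.add h i else h) h).Nodup := by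
  induction xs with
  | nil => intro h hn; simpa using hn
  | cons x xs ih =>
    intro h hn
    simp only [List.foldl_cons]
    apply ih
    by_cases hq : q x
    · simpa [hq] using PySem.Set.nodup_add h x hn
    · simpa [hq] using hn

lemma mem_inner_fold (cs : List Char) (val : List Char) (n : Int) (h : PySem.Set Int) (y : Int) :
    y ∈ (PySem.List.pyRange 0 n 1).foldl (fun h i =>
        if PySem.Chars.startswith (cs.drop i.toNat) val then PySem.Set.add h i else h) h ↔
      y ∈ h ∨ (y ∈ PySem.List.pyRange 0 n 1 ∧ val <+: cs.drop y.toNat) := by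
  rw [mem_foldl_add_if (fun i => PySem.Chars.startswith (cs.drop i.toNat) val)]
  rw [PySem.Chars.startswith_iff]

lemma nodup_inner_fold (cs : List Char) (val : List Char) (n : Int) (h : PySem.Set Int)
    (hn : h.Nodup) :
    ((PySem.List.pyRange 0 n 1).foldl (fun h i =>
        if PySem.Chars.startswith (cs.drop i.toNat) val then PySem.Set.add h i else h) h).Nodup :=
  nodup_foldl_add_if (fun i => PySem.Chars.startswith (cs.drop i.toNat) val) _ h hn

lemma mem_outer_fold (cs : List Char) (mv : List String) (n : Int) (h : PySem.Set Int) (y : Int) :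
    y ∈ mv.foldl (fun h val =>
        (PySem.List.pyRange 0 n 1).foldl (fun h i =>
          if PySem.Chars.startswith (cs.drop i.toNat) val.toList then PySem.Set.add h i else h) h) h ↔
      y ∈ h ∨ (y ∈ PySem.List.pyRange 0 n 1 ∧ matchAtB cs mv y = true) := by
  induction mv generalizing h with
  | nil => simp [matchAtB]
  | cons val rest ih =>
    simp only [List.foldl_cons, ih, mem_inner_fold, matchAtB, List.any_cons,
      Bool.or_eq_true, List.isPrefixOf_iff_prefix]
    tauto

lemma nodup_outer_fold (cs : List Char) (mv : List String) (n : Int) (h : PySem.Set Int)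
    (hn : h.Nodup) :
    (mv.foldl (fun h val =>
        (PySem.List.pyRange 0 n 1).foldl (fun h i =>
          if PySem.Chars.startswith (cs.drop i.toNat) val.toList then PySem.Set.add h i else h) h) h).Nodup := by
  induction mv generalizing h with
  | nil => simpa using hn
  | cons val rest ih =>
    simp only [List.foldl_cons]
    exact ih _ (nodup_inner_fold cs val.toList n h hn)

lemma multi_find_eq_filter (l : String) (mv : List String) :
    multi_find l mv =
      (PySem.List.pyRange 0 (l.toList.length : Int) 1).filter
        (fun i => matchAtB l.toList mv i) := by
  show (PySem.List.pyRange 0 (l.toList.length : Int) 1).foldl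
      (fun result i => multiFindInner l.toList i mv result) [] =
    (PySem.List.pyRange 0 (l.toList.length : Int) 1).filter (fun i => matchAtB l.toList mv i)
  rw [PySem.List.foldl_congr_mem _ _
    (fun (result : List Int) (i : Int) => if matchAtB l.toList mv i then result ++ [i] else result) _
    (by
      intro result i hi
      exact multiFindInner_eq l.toList i
        (((PySem.List.mem_pyRange_one).mp hi).1) mv result)]
  rw [PySem.List.foldl_append_if_eq_filter]
  simp


-- ===== VERDICT (by name: the statement is the Claim_ definition above) =====
theorem multi_find_spec : Claim_equal_multi_find := by
  intro l mv _
  unfold Spec_multi_find multi_find_alt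
  simp only []
  rw [multi_find_eq_filter]
  refine (PySem.List.sorted_eq_of_perm_of_pairwise_lt _ _ _ ?_ ?_).symm
  · rw [List.perm_ext_iff_of_nodup
      ((PySem.List.nodup_pyRange_one 0 (l.toList.length : Int)).filter _)
      (nodup_outer_fold _ _ _ PySem.Set.empty (by simp [PySem.Set.empty]))]
    intro y
    rw [List.mem_filter, mem_outer_fold]
    simp
  · exact (PySem.List.pairwise_lt_pyRange_one 0 (l.toList.length : Int)).filter _
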